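-- pv_equiv track=rewrite | github.com/yh-DMIR/TabICL | benchmark_tabicl_dp_serial.py | _split_indices
-- ===== SOURCE A (Python) =====
-- from typing import Optional, Tuple, List, Dict, Any
--
-- def _split_indices(n: int, parts: int) -> List[Tuple[int, int]]:
--     """Return list of (start, end) half-open slices covering [0, n)."""
--     if parts <= 0:
--         raise ValueError("parts must be > 0")
--     base = n // parts
--     rem = n % parts
--     out = []
--     s = 0
--     for i in range(parts):
--         e = s + base + (1 if i < rem else 0)
--         out.append((s, e))
--         s = e
--     return out
-- ===== SOURCE B (Python) =====
-- def _split_indices(n, parts):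
--     """Return list of (start, end) half-open slices covering [0, n)."""
--     if parts <= 0:
--         raise ValueError("parts must be > 0")
--     base, rem = divmod(n, parts)
--     bnd = lambda i: i * base + min(i, rem)
--     return [(bnd(i), bnd(i + 1)) for i in range(parts)]
-- ===== Notes on version B (the rewrite author's own statement) =====
-- stated objective: alternative
-- what changed: Replaces the loop-carried running start accumulator with a closed-form boundary formula bnd(i) = i*base + min(i, rem), deriving every slice independently from its index.
import Mathlib
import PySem

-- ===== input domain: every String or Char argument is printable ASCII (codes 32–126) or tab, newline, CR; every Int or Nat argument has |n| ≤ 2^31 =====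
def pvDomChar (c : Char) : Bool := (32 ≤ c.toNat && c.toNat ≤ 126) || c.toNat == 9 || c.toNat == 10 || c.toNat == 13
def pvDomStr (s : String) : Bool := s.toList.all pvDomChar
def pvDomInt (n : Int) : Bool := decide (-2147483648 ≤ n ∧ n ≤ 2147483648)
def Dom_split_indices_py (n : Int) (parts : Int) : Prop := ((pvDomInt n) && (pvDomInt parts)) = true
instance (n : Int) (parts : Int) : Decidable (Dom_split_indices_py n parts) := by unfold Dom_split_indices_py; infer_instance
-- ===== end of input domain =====

-- B replaces A's loop-carried running start with the closed-form boundary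
-- bnd(i) = i*base + min(i, rem); same output, alternative decomposition.

-- ===== PORT A =====
-- literal port of A: running accumulator s, one append per loop iteration
def split_indices_py (n : Int) (parts : Int) : List (Int × Int) :=
  if parts ≤ 0 then []  -- Python raises ValueError here; excluded by Pre_
  else
    let base := PySem.Int.floordiv n parts
    let rem := PySem.Int.mod n parts
    (((PySem.List.pyRange 0 parts 1).foldl
        (fun (st : List (Int × Int) × Int) i =>
          let e := st.2 + base + (if i < rem then 1 else 0)
          (st.1 ++ [(st.2, e)], e))
        ([], 0))).1

-- ===== PORT B =====
-- literal port of B: each slice computed independently from its index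
def split_indices_py_alt (n : Int) (parts : Int) : List (Int × Int) :=
  if parts ≤ 0 then []  -- Python raises ValueError here; excluded by Pre_
  else
    let base := PySem.Int.floordiv n parts
    let rem := PySem.Int.mod n parts
    let bnd : Int → Int := fun i => i * base + min i rem
    (PySem.List.pyRange 0 parts 1).map (fun i => (bnd i, bnd (i + 1)))

-- ===== PRECONDITION & SPEC =====
-- Pre_ excludes exactly parts ≤ 0, where Python A raises ValueError.
def Pre_split_indices_py (n : Int) (parts : Int) : Prop := 0 < parts
instance (n : Int) (parts : Int) : Decidable (Pre_split_indices_py n parts) := by unfold Pre_split_indices_py; infer_instance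
def pvWitness_split_indices_py : Int × Int := (10, 3)

def Spec_split_indices_py (n : Int) (parts : Int) (out : List (Int × Int)) : Prop := out = split_indices_py_alt n parts
instance (n : Int) (parts : Int) (out : List (Int × Int)) : Decidable (Spec_split_indices_py n parts out) := by unfold Spec_split_indices_py; infer_instance

-- ===== CLAIM (what is proved, stated in full; the proofs are below) =====
def Claim_equal_split_indices_py : Prop := ∀ (n : Int) (parts : Int), Dom_split_indices_py n parts → Pre_split_indices_py n parts → Spec_split_indices_py n parts (split_indices_py n parts)

-- ===== LEMMAS AND PROOFS =====

-- the boundary step identity: one loop step of A advances bnd by exactly e - s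
theorem pv_bnd_step (base rem : Int) (i : Int) :
    (i + 1) * base + min (i + 1) rem
      = (i * base + min i rem) + base + (if i < rem then 1 else 0) := by
  rcases lt_or_ge i rem with h | h
  · rw [min_eq_left (by omega), min_eq_left (by omega), if_pos h]; ring
  · rw [min_eq_right (by omega), min_eq_right (by omega), if_neg (not_lt.mpr h)]; ring

-- loop invariant: after the first m iterations, A's state is
-- (the first m slices of B, bnd m)
theorem pv_loop_eq (base rem : Int) (hrem : 0 ≤ rem) (m : Nat) :
    ((List.range m).map (fun k : Nat => ((0 : Int) + k))).foldl
        (fun (st : List (Int × Int) × Int) i =>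
          let e := st.2 + base + (if i < rem then 1 else 0)
          (st.1 ++ [(st.2, e)], e))
        ([], 0)
      = (((List.range m).map (fun k : Nat => ((0 : Int) + k))).map
          (fun i => (i * base + min i rem, (i + 1) * base + min (i + 1) rem)),
        (m : Int) * base + min (m : Int) rem) := by
  induction m with
  | zero => simp [min_eq_left hrem]
  | succ m ih =>
    rw [List.range_succ, List.map_append, List.foldl_append, List.map_append, ih]
    simp only [List.map_cons, List.map_nil, List.foldl_cons, List.foldl_nil,
      zero_add, Nat.cast_add, Nat.cast_one]
    rw [pv_bnd_step base rem (m : Int)]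

-- ===== VERDICT (by name: the statement is the Claim_ definition above) =====
theorem split_indices_py_spec : Claim_equal_split_indices_py := by
  intro n parts _ hpre
  unfold Pre_split_indices_py at hpre
  unfold Spec_split_indices_py split_indices_py split_indices_py_alt
  rw [if_neg (by omega), if_neg (by omega)]
  have hrem : 0 ≤ PySem.Int.mod n parts := by
    exact PySem.Int.mod_nonneg n (by omega)
  simp only [PySem.List.pyRange_one]
  rw [pv_loop_eq _ _ hrem]
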